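-- pv_equiv track=rewrite | github.com/nicorodriguezx/IA | entrega_1_local.py | lugares_vacios
-- ===== SOURCE A (Python) =====
-- def lugares_vacios(state):
--     posiciones = []
--     for fila in range(10):
--         for col in range(10):
--             pos = (fila, col)
--             posiciones.append(pos)
--     empty = []
--     for pos in posiciones:
--         if pos not in state:
--             empty.append(pos)
--     return empty
-- ===== SOURCE B (Python) =====
-- def lugares_vacios(state):
--     all_cells = {(f, c) for f in range(10) for c in range(10)}
--     return sorted(all_cells - set(state))
-- ===== Notes on version B (the rewrite author's own statement) =====
-- stated objective: idiomatic
-- what changed: Replaces A's explicit nested append loop plus a second membership-filtering loop with a set comprehension, a set difference and a sort (row-major order of sorted (row,col) tuples matches A's loop order).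
import Mathlib
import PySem

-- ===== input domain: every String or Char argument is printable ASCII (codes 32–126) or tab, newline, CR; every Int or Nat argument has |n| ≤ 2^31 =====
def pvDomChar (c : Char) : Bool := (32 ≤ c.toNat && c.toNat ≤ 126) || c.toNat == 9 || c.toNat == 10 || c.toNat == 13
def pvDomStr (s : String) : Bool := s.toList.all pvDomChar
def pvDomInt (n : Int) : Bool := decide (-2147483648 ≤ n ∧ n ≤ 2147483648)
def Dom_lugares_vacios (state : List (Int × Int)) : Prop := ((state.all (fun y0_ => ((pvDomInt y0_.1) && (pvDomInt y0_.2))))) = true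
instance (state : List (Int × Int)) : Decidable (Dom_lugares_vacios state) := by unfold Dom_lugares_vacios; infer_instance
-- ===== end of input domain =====

-- B replaces A's nested append loop + membership-filter loop by a set difference and a sort (idiomatic; same cost class on the fixed 10x10 grid).

-- ===== PORT A =====
def lugares_vacios (state : List (Int × Int)) : List (Int × Int) :=
  let posiciones : List (Int × Int) :=
    (PySem.List.pyRange 0 10 1).foldl (fun acc fila =>
      (PySem.List.pyRange 0 10 1).foldl (fun acc col =>
        let pos := (fila, col)
        acc ++ [pos]) acc) []
  posiciones.foldl (fun empty pos => if pos ∉ state then empty ++ [pos] else empty) []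

-- ===== PORT B =====
def lugares_vacios_alt (state : List (Int × Int)) : List (Int × Int) :=
  let all_cells : PySem.Set (Int × Int) :=
    PySem.Set.ofList ((PySem.List.pyRange 0 10 1).flatMap (fun f =>
      (PySem.List.pyRange 0 10 1).map (fun c => (f, c))))
  PySem.List.sorted2 (PySem.Set.diff all_cells (PySem.Set.ofList state)) (fun p => p.1) (fun p => p.2)

-- ===== PRECONDITION & SPEC =====
def Spec_lugares_vacios (state : List (Int × Int)) (out : List (Int × Int)) : Prop := out = lugares_vacios_alt state
instance (state : List (Int × Int)) (out : List (Int × Int)) : Decidable (Spec_lugares_vacios state out) := by unfold Spec_lugares_vacios; infer_instance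

-- ===== CLAIM (what is proved, stated in full; the proofs are below) =====
def Claim_equal_lugares_vacios : Prop := ∀ (state : List (Int × Int)), Dom_lugares_vacios state → Spec_lugares_vacios state (lugares_vacios state)

-- ===== LEMMAS AND PROOFS =====

-- the 100 grid cells, row-major (closed term; both ports traverse it)
def pvGrid : List (Int × Int) :=
  (PySem.List.pyRange 0 10 1).flatMap (fun f => (PySem.List.pyRange 0 10 1).map (fun c => (f, c)))

-- folding insertBy over a list whose elements never go "before" anything already placed appends in order
lemma foldl_insertBy_id {α : Type} (before : α → α → Bool) :
    ∀ (l acc : List α), (∀ x ∈ l, ∀ y ∈ acc, before x y = false) →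
      l.Pairwise (fun a b => before b a = false) →
      l.foldl (fun acc x => PySem.List.insertBy before x acc) acc = acc ++ l := by
  intro l
  induction l with
  | nil => intro acc _ _; simp
  | cons x t ih =>
    intro acc hacc hp
    have hx : PySem.List.insertBy before x acc = acc ++ [x] :=
      PySem.List.insertBy_of_forall_not_before before x acc (hacc x (by simp))
    simp only [List.foldl_cons, hx]
    rw [ih (acc ++ [x])
      (fun z hz y hy => by
        rcases List.mem_append.mp hy with h | h
        · exact hacc z (by simp [hz]) y h
        · simp at h; subst h; exact (List.pairwise_cons.mp hp).1 z hz)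
      (List.pairwise_cons.mp hp).2]
    simp

set_option maxRecDepth 8192 in
lemma lugares_vacios_eq_filter (state : List (Int × Int)) :
    lugares_vacios state = pvGrid.filter (fun p => !decide (p ∈ state)) := by
  have hpos : ((PySem.List.pyRange 0 10 1).foldl (fun acc fila =>
      (PySem.List.pyRange 0 10 1).foldl (fun acc col => acc ++ [(fila, col)]) acc)
      ([] : List (Int × Int))) = pvGrid := by decide
  show ((PySem.List.pyRange 0 10 1).foldl (fun acc fila =>
      (PySem.List.pyRange 0 10 1).foldl (fun acc col => acc ++ [(fila, col)]) acc)
      ([] : List (Int × Int))).foldl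
      (fun empty pos => if pos ∉ state then empty ++ [pos] else empty) [] = _
  rw [hpos]
  have hfun : (fun (empty : List (Int × Int)) pos => if pos ∉ state then empty ++ [pos] else empty)
      = (fun empty pos => if (!decide (pos ∈ state)) = true then empty ++ [(fun x => x) pos] else empty) := by
    funext e p; by_cases h : p ∈ state <;> simp [h]
  rw [hfun, PySem.List.foldl_append_if]
  simp

set_option maxRecDepth 8192 in
lemma lugares_vacios_alt_eq_filter (state : List (Int × Int)) :
    lugares_vacios_alt state = pvGrid.filter (fun p => !decide (p ∈ state)) := by
  unfold lugares_vacios_alt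
  have hgrid : PySem.Set.ofList ((PySem.List.pyRange 0 10 1).flatMap (fun f =>
      (PySem.List.pyRange 0 10 1).map (fun c => ((f : Int), (c : Int))))) = pvGrid := by decide
  rw [hgrid]
  show PySem.List.sorted2 (PySem.Set.diff pvGrid (PySem.Set.ofList state)) (fun p => p.1) (fun p => p.2) = _
  have hdiff : PySem.Set.diff pvGrid (PySem.Set.ofList state)
      = pvGrid.filter (fun p => !decide (p ∈ state)) := by
    show pvGrid.filter (fun x => !(PySem.Set.ofList state).contains x) = _
    congr 1
    funext p
    by_cases h : p ∈ state <;>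
      simp [h, show ((PySem.Set.ofList state).contains p = true ↔ p ∈ state) from by
        simp [PySem.Set.contains_iff, PySem.Set.mem_ofList]]
  rw [hdiff]
  -- the filtered grid is already in strictly increasing (row, col) order, so the sort is the identity
  have hpair : pvGrid.Pairwise (fun a b =>
      (fun a b => decide (a.1 < b.1) || !decide (b.1 < a.1) && decide (a.2 < b.2)) b a = false) := by
    decide
  have hpairf := hpair.filter (fun p => !decide (p ∈ state))
  show (pvGrid.filter (fun p => !decide (p ∈ state))).foldl
      (fun acc x => PySem.List.insertBy
        (fun a b => decide (a.1 < b.1) || !decide (b.1 < a.1) && decide (a.2 < b.2)) x acc) [] = _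
  rw [foldl_insertBy_id _ _ [] (by simp) hpairf]
  simp

-- ===== VERDICT (by name: the statement is the Claim_ definition above) =====
theorem lugares_vacios_spec : Claim_equal_lugares_vacios := by
  intro state _
  show lugares_vacios state = lugares_vacios_alt state
  rw [lugares_vacios_eq_filter, lugares_vacios_alt_eq_filter]
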